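-- pv_equiv track=rewrite | github.com/CelioDS/Projetos-Python | dio-bootcamp/DADOS/paresecontr.py | findNumOfPairs
-- ===== SOURCE A (Python) =====
-- def findNumOfPairs(a, b):
--     a.sort()
--     b.sort()
--
--     contador = 0
--     position = 0
--
--     for i in range(len(a)):
--         # Procurar o primeiro b[position] que é maior que a[i]
--         while position < len(b) and b[position] <= a[i]:
--             position += 1
--
--         if position < len(b):
--             contador += 1
--             position += 1  # Passa para o próximo elemento de b
--
--     return contador
-- ===== SOURCE B (Python) =====
-- def findNumOfPairs(a, b):
--     a.sort()
--     b.sort()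
--     count = 0
--     i = 0
--     for x in b:
--         if i < len(a) and x > a[i]:
--             count += 1
--             i += 1
--     return count
-- ===== Notes on version B (the rewrite author's own statement) =====
-- stated objective: alternative
-- what changed: B drives a single flat loop over sorted b with one index into a (increment count and the index whenever the current b element exceeds a[i]), replacing A's outer loop over a with a nested while that skips b; same in-place sorts are kept.
import Mathlib
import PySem

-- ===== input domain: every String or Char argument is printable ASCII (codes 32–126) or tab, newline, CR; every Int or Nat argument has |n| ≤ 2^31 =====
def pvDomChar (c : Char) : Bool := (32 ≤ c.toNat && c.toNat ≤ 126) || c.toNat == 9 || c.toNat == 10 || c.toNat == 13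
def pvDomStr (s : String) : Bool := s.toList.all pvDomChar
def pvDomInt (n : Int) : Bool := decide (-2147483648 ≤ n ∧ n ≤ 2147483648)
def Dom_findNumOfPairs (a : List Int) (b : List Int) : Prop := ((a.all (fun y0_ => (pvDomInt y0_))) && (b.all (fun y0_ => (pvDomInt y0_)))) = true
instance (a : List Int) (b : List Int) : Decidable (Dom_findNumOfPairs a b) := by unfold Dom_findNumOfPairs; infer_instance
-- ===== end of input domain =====

-- B replaces A's a-driven loop with its nested b-skipping while by one flat loop over b with
-- a single index into a (alternative decomposition, same cost). Both Pythons sort a and b in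
-- place (B performs the same mutation); the equivalence proved is about the return value.

-- ===== PORT A =====
-- the inner `while position < len(b) and b[position] <= a[i]: position += 1`
def pvWhileSkip (bs : List Int) (ai : Int) (position : Nat) : Nat :=
  if _ : position < bs.length ∧ bs[position]! ≤ ai then
    pvWhileSkip bs ai (position + 1)
  else
    position
termination_by bs.length - position
decreasing_by omega

-- the `for i in range(len(a))` loop with state (contador, position)
def pvLoopA (as_ bs : List Int) (i : Nat) (contador : Int) (position : Nat) : Int :=
  if _ : i < as_.length then
    let position' := pvWhileSkip bs as_[i]! position
    if position' < bs.length then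
      pvLoopA as_ bs (i + 1) (contador + 1) (position' + 1)
    else
      pvLoopA as_ bs (i + 1) contador position'
  else
    contador
termination_by as_.length - i
decreasing_by all_goals omega

def findNumOfPairs (a : List Int) (b : List Int) : Int :=
  pvLoopA (PySem.List.sorted a (fun x => x)) (PySem.List.sorted b (fun x => x)) 0 0 0

-- ===== PORT B =====
-- `for x in b: if i < len(a) and x > a[i]: count += 1; i += 1`
def pvLoopB (as_ : List Int) : List Int → Int → Nat → Int
  | [], count, _ => count
  | x :: rest, count, i =>
    if i < as_.length ∧ as_[i]! < x then
      pvLoopB as_ rest (count + 1) (i + 1)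
    else
      pvLoopB as_ rest count i

def findNumOfPairs_alt (a : List Int) (b : List Int) : Int :=
  pvLoopB (PySem.List.sorted a (fun x => x)) (PySem.List.sorted b (fun x => x)) 0 0

-- ===== PRECONDITION & SPEC =====
def Spec_findNumOfPairs (a : List Int) (b : List Int) (out : Int) : Prop := out = findNumOfPairs_alt a b
instance (a : List Int) (b : List Int) (out : Int) : Decidable (Spec_findNumOfPairs a b out) := by unfold Spec_findNumOfPairs; infer_instance

-- ===== CLAIM (what is proved, stated in full; the proofs are below) =====
def Claim_equal_findNumOfPairs : Prop := ∀ (a : List Int) (b : List Int), Dom_findNumOfPairs a b → Spec_findNumOfPairs a b (findNumOfPairs a b)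

-- ===== LEMMAS AND PROOFS =====

-- abstract form of A's recursion: drop the b-prefix ≤ a, then match one element
def pvFAux : List Int → List Int → Int
  | [], _ => 0
  | a :: as_, bs =>
    match (bs.dropWhile (fun x => decide (x ≤ a))) with
    | [] => 0
    | _ :: r => 1 + pvFAux as_ r

-- abstract form of B's recursion: consume b, match against the head of a
def pvGAux : List Int → List Int → Int
  | _, [] => 0
  | [], _ :: bs => pvGAux [] bs
  | a :: as_, x :: bs => if a < x then 1 + pvGAux as_ bs else pvGAux (a :: as_) bs
termination_by _ bs => bs.length

theorem pvFAux_nil (as_ : List Int) : pvFAux as_ [] = 0 := by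
  cases as_ <;> simp [pvFAux]

theorem pvGAux_nil (bs : List Int) : pvGAux [] bs = 0 := by
  induction bs with
  | nil => simp [pvGAux]
  | cons x bs ih => simpa [pvGAux] using ih

theorem pvGAux_skip (a : Int) (as_ bs : List Int) :
    pvGAux (a :: as_) bs =
      match (bs.dropWhile (fun x => decide (x ≤ a))) with
      | [] => 0
      | _ :: r => 1 + pvGAux as_ r := by
  induction bs with
  | nil => simp [pvGAux]
  | cons x bs ih =>
    by_cases hx : x ≤ a
    · have hlt : ¬ a < x := not_lt.mpr hx
      simp [pvGAux, hlt, hx, ih]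
    · have hlt : a < x := lt_of_not_ge hx
      simp [pvGAux, hlt, hx]

theorem pvF_eq_pvG (as_ : List Int) : ∀ bs, pvFAux as_ bs = pvGAux as_ bs := by
  induction as_ with
  | nil => intro bs; simp [pvFAux, pvGAux_nil]
  | cons a as_ ih =>
    intro bs
    rw [pvGAux_skip]
    simp only [pvFAux]
    cases h : bs.dropWhile (fun x => decide (x ≤ a)) with
    | nil => rfl
    | cons y r => simp [ih]

theorem pvWhileSkip_drop (bs : List Int) (ai : Int) (p : Nat) :
    bs.drop (pvWhileSkip bs ai p) = (bs.drop p).dropWhile (fun x => decide (x ≤ ai)) := by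
  unfold pvWhileSkip
  split
  · next h =>
    obtain ⟨hp, hle⟩ := h
    rw [getElem!_pos bs p hp] at hle
    rw [pvWhileSkip_drop bs ai (p + 1)]
    conv_rhs => rw [List.drop_eq_getElem_cons hp, List.dropWhile_cons]
    rw [if_pos (by simpa using hle)]
  · next h =>
    by_cases hp : p < bs.length
    · have hgt : ¬ bs[p]! ≤ ai := fun hc => h ⟨hp, hc⟩
      rw [getElem!_pos bs p hp] at hgt
      conv_rhs => rw [List.drop_eq_getElem_cons hp, List.dropWhile_cons]
      rw [if_neg (by simpa using hgt), ← List.drop_eq_getElem_cons hp]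
    · rw [List.drop_eq_nil_of_le (by omega)]
      rfl
termination_by bs.length - p
decreasing_by omega

theorem pvLoopB_eq (as_ : List Int) :
    ∀ bs (c : Int) (i : Nat), pvLoopB as_ bs c i = c + pvGAux (as_.drop i) bs := by
  intro bs
  induction bs with
  | nil => intro c i; simp [pvLoopB, pvGAux]
  | cons x rest ih =>
    intro c i
    by_cases hi : i < as_.length
    · rw [List.drop_eq_getElem_cons hi]
      by_cases hx : as_[i]! < x
      · have hx' : as_[i] < x := by rwa [getElem!_pos as_ i hi] at hx
        simp only [pvLoopB, pvGAux, ih]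
        rw [if_pos ⟨hi, hx⟩, if_pos hx']
        ring
      · have hx' : ¬ as_[i] < x := by rwa [getElem!_pos as_ i hi] at hx
        simp only [pvLoopB, pvGAux, ih]
        rw [if_neg (by tauto), if_neg hx', List.drop_eq_getElem_cons hi]
    · have hd : as_.drop i = [] := List.drop_eq_nil_of_le (by omega)
      simp only [pvLoopB, ih]
      rw [if_neg (by tauto), hd]
      simp [pvGAux_nil]

theorem pvLoopA_eq (as_ bs : List Int) :
    ∀ (i : Nat) (c : Int) (p : Nat),
      pvLoopA as_ bs i c p = c + pvFAux (as_.drop i) (bs.drop p) := by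
  intro i
  induction hn : as_.length - i using Nat.strong_induction_on generalizing i with
  | _ n ihn =>
  intro c p
  by_cases hi : i < as_.length
  · have hdropA : as_.drop i = as_[i] :: as_.drop (i + 1) := List.drop_eq_getElem_cons hi
    have hget : as_[i]! = as_[i] := getElem!_pos as_ i hi
    have hdw : bs.drop (pvWhileSkip bs as_[i]! p)
        = (bs.drop p).dropWhile (fun x => decide (x ≤ as_[i])) := by
      rw [← hget]; exact pvWhileSkip_drop bs as_[i]! p
    set p' := pvWhileSkip bs as_[i]! p with hp'
    rw [pvLoopA]
    rw [dif_pos hi]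
    simp only [← hp']
    by_cases hlt : p' < bs.length
    · obtain ⟨y, r, hyr⟩ : ∃ y r, bs.drop p' = y :: r := by
        cases h : bs.drop p' with
        | nil => exact absurd hlt (by rw [List.drop_eq_nil_iff] at h; omega)
        | cons y r => exact ⟨y, r, rfl⟩
      have hr : bs.drop (p' + 1) = r := by
        rw [← List.drop_drop, hyr, List.drop_one]
        rfl
      rw [if_pos hlt, ihn (as_.length - (i + 1)) (by omega) (i + 1) rfl, hr, hdropA]
      simp only [pvFAux, ← hdw, hyr]
      ring
    · rw [if_neg hlt, ihn (as_.length - (i + 1)) (by omega) (i + 1) rfl, hdropA]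
      have hnil : bs.drop p' = [] := by rw [List.drop_eq_nil_iff]; omega
      simp only [pvFAux, ← hdw, hnil, pvFAux_nil]
  · have hd : as_.drop i = [] := List.drop_eq_nil_of_le (by omega)
    rw [pvLoopA, dif_neg hi, hd]
    simp [pvFAux]

theorem findNumOfPairs_spec : Claim_equal_findNumOfPairs := by
  intro a b _
  unfold Spec_findNumOfPairs findNumOfPairs findNumOfPairs_alt
  rw [pvLoopA_eq, pvLoopB_eq]
  simp [pvF_eq_pvG]
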